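-- pv_equiv track=rewrite | github.com/katherine4191/Algorithm-Study | kyeonghyeon/알고리즘의 정석/01 재귀호출/MISSION/문자열 포함 관계 조사.py | strContain
-- ===== SOURCE A (Python) =====
-- def strContain(A, B) :
--     '''
--     문자열 A의 알파벳이 문자열 B에 모두 포함되어 있으면 "Yes", 아니면 "No"를 반환합니다.
--     '''
--
--     # base condition
--     if len(A) == 0:
--         return "Yes"
--
--     # recursive
--     target = A[0]
--
--     if target in B:
--         return strContain(A[1:], B)
--     else:
--         return "No"
-- ===== SOURCE B (Python) =====
-- def strContain(A, B):
--     return "Yes" if all(c in B for c in A) else "No"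
-- ===== Notes on version B (the rewrite author's own statement) =====
-- stated objective: faster
-- what changed: Replaces the explicit recursion with repeated slicing A[1:] by a single short-circuiting all(c in B for c in A) expression.
import Mathlib
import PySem

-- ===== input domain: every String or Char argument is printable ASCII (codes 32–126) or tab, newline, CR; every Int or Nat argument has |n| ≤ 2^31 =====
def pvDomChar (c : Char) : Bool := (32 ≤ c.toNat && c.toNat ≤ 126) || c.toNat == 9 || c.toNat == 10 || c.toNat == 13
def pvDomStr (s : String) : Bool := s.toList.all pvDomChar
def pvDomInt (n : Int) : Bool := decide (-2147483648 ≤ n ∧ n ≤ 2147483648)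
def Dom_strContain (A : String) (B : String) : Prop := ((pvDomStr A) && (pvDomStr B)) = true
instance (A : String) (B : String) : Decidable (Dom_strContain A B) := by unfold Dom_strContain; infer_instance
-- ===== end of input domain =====

-- B replaces A's recursion (with repeated A[1:] slicing) by a single all(...) expression; objective: idiomatic.

-- ===== PORT A =====
-- recursion on the character list of A; `target in B` is membership in B's characters
def strContainGo : List Char → List Char → String
  | [], _ => "Yes"
  | target :: rest, b => if b.contains target then strContainGo rest b else "No"

def strContain (A : String) (B : String) : String := strContainGo A.toList B.toList

-- ===== PORT B =====
def strContain_alt (A : String) (B : String) : String :=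
  if A.toList.all (fun c => B.toList.contains c) then "Yes" else "No"

-- ===== PRECONDITION & SPEC =====
def Spec_strContain (A : String) (B : String) (out : String) : Prop := out = strContain_alt A B
instance (A : String) (B : String) (out : String) : Decidable (Spec_strContain A B out) := by unfold Spec_strContain; infer_instance

-- ===== CLAIM (what is proved, stated in full; the proofs are below) =====
def Claim_equal_strContain : Prop := ∀ (A : String) (B : String), Dom_strContain A B → Spec_strContain A B (strContain A B)

-- ===== LEMMAS AND PROOFS =====
theorem strContainGo_eq_all (a b : List Char) :
    strContainGo a b = if a.all (fun c => b.contains c) then "Yes" else "No" := by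
  induction a with
  | nil => simp [strContainGo]
  | cons t rest ih =>
    by_cases h : t ∈ b <;> simp [strContainGo, h, ih]

-- ===== VERDICT (by name: the statement is the Claim_ definition above) =====
theorem strContain_spec : Claim_equal_strContain := by
  intro A B _
  unfold Spec_strContain strContain strContain_alt
  exact strContainGo_eq_all A.toList B.toList
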